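-- pv_equiv track=rewrite | github.com/jonathangu/brain-ground-zero | src/brain_ground_zero/recorded_h2h.py | _score_from_verdicts
-- ===== SOURCE A (Python) =====
-- from typing import Any, Dict, List, Optional
--
-- def _score_from_verdicts(verdicts: List[Dict]) -> Dict[str, Dict[str, int]]:
--     """Derive accuracy from in-memory verdict list."""
--     result: Dict[str, Dict[str, int]] = {}
--     for v in verdicts:
--         bl = v["baseline"]
--         if bl not in result:
--             result[bl] = {"total": 0, "correct": 0}
--         result[bl]["total"] += 1
--         if v["verdict"] == "correct":
--             result[bl]["correct"] += 1
--     return result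
-- ===== SOURCE B (Python) =====
-- def _score_from_verdicts(verdicts):
--     """Two separate tallies (totals, corrects) merged at the end, instead of one fused incremental pass."""
--     totals = {}
--     for v in verdicts:
--         bl = v["baseline"]
--         totals[bl] = totals.get(bl, 0) + 1
--     corrects = {}
--     for v in verdicts:
--         if v["verdict"] == "correct":
--             bl = v["baseline"]
--             corrects[bl] = corrects.get(bl, 0) + 1
--     return {bl: {"total": t, "correct": corrects.get(bl, 0)} for bl, t in totals.items()}
-- ===== Notes on version B (the rewrite author's own statement) =====
-- stated objective: alternative
-- what changed: Replaces A's single fused pass that incrementally updates a nested per-baseline dict by two independent flat tallies (totals and corrects, each a plain dict counter) merged into the nested result in a final pass over totals.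
import Mathlib
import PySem

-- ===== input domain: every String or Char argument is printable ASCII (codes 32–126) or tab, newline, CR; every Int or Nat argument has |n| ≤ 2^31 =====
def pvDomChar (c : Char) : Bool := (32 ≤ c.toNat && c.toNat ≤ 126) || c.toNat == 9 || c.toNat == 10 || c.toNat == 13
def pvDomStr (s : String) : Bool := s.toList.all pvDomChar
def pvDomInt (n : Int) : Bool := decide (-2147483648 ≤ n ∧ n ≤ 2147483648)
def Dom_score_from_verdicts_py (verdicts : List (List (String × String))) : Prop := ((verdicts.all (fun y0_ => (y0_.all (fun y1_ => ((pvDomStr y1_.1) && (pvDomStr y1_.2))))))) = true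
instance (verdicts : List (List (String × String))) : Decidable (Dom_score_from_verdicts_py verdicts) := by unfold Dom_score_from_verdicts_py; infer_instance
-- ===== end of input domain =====

-- B replaces A's single fused pass (incremental nested-dict update) by two independent tallies
-- (totals, corrects) merged at the end — objective: alternative decomposition, same cost.

-- ===== PORT A =====
-- loop body of A: bl = v["baseline"]; if bl not in result: result[bl] = {...};
-- result[bl]["total"] += 1; if v["verdict"] == "correct": result[bl]["correct"] += 1
-- (v[k] lookups are first-match on the assoc list; Pre_ guarantees the keys exist)
def pvStepA (result : PySem.Dict String (PySem.Dict String Int)) (v : List (String × String)) :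
    PySem.Dict String (PySem.Dict String Int) :=
  let bl := (List.lookup "baseline" v).getD ""
  let result :=
    if result.contains bl then result
    else result.insert bl (PySem.Dict.mk [("total", 0), ("correct", 0)])
  let result := result.modify bl PySem.Dict.empty (fun d => d.modify "total" 0 (· + 1))
  if (List.lookup "verdict" v).getD "" == "correct" then
    result.modify bl PySem.Dict.empty (fun d => d.modify "correct" 0 (· + 1))
  else result

def score_from_verdicts_py (verdicts : List (List (String × String))) :
    List (String × List (String × Int)) :=
  ((verdicts.foldl pvStepA PySem.Dict.empty).items.map (fun p => (p.1, p.2.items)))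

-- ===== PORT B =====
-- first pass of B: totals[bl] = totals.get(bl, 0) + 1
def pvStepT (t : PySem.Dict String Int) (v : List (String × String)) : PySem.Dict String Int :=
  let bl := (List.lookup "baseline" v).getD ""
  t.insert bl (t.getD bl 0 + 1)

-- second pass of B: if v["verdict"] == "correct": corrects[bl] = corrects.get(bl, 0) + 1
def pvStepC (c : PySem.Dict String Int) (v : List (String × String)) : PySem.Dict String Int :=
  if (List.lookup "verdict" v).getD "" == "correct" then
    let bl := (List.lookup "baseline" v).getD ""
    c.insert bl (c.getD bl 0 + 1)
  else c

def score_from_verdicts_py_alt (verdicts : List (List (String × String))) :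
    List (String × List (String × Int)) :=
  let totals := verdicts.foldl pvStepT PySem.Dict.empty
  let corrects := verdicts.foldl pvStepC PySem.Dict.empty
  totals.items.map (fun p => (p.1, [("total", p.2), ("correct", corrects.getD p.1 0)]))

-- ===== PRECONDITION & SPEC =====
-- Pre_ excludes exactly the verdict dicts lacking a "baseline" or "verdict" key, on which Python A raises KeyError.
def Pre_score_from_verdicts_py (verdicts : List (List (String × String))) : Prop :=
  (verdicts.all (fun v => (List.lookup "baseline" v).isSome && (List.lookup "verdict" v).isSome)) = true
instance (verdicts : List (List (String × String))) : Decidable (Pre_score_from_verdicts_py verdicts) := by unfold Pre_score_from_verdicts_py; infer_instance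

def pvWitness_score_from_verdicts_py : (List (List (String × String))) :=
  [[("baseline", "x"), ("verdict", "correct")], [("baseline", "x"), ("verdict", "wrong")]]

def Spec_score_from_verdicts_py (verdicts : List (List (String × String))) (out : List (String × List (String × Int))) : Prop := out = score_from_verdicts_py_alt verdicts
instance (verdicts : List (List (String × String))) (out : List (String × List (String × Int))) : Decidable (Spec_score_from_verdicts_py verdicts out) := by unfold Spec_score_from_verdicts_py; infer_instance

-- ===== CLAIM (what is proved, stated in full; the proofs are below) =====
def Claim_equal_score_from_verdicts_py : Prop := ∀ (verdicts : List (List (String × String))), Dom_score_from_verdicts_py verdicts → Pre_score_from_verdicts_py verdicts → Spec_score_from_verdicts_py verdicts (score_from_verdicts_py verdicts)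

-- ===== LEMMAS AND PROOFS =====

-- A's accumulator after any prefix, expressed from B's two tallies over the same prefix.
def pvMerge (t c : PySem.Dict String Int) : PySem.Dict String (PySem.Dict String Int) :=
  PySem.Dict.mk (t.items.map (fun p => (p.1, PySem.Dict.mk [("total", p.2), ("correct", c.getD p.1 0)])))

theorem pvMerge_items (t c : PySem.Dict String Int) : (pvMerge t c).items
    = t.items.map (fun p => (p.1, PySem.Dict.mk [("total", p.2), ("correct", c.getD p.1 0)])) := rfl

theorem pvMerge_keys (t c : PySem.Dict String Int) : (pvMerge t c).keys = t.keys := by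
  simp [pvMerge, PySem.Dict.keys, List.map_map, Function.comp]

theorem pvMerge_contains (t c : PySem.Dict String Int) (k : String) :
    (pvMerge t c).contains k = t.contains k := by
  rw [PySem.Dict.contains_eq_decide_mem_keys, PySem.Dict.contains_eq_decide_mem_keys, pvMerge_keys]

theorem pv_inner_total (val cv : Int) :
    (PySem.Dict.mk [("total", val), ("correct", cv)]).modify "total" 0 (· + 1)
      = PySem.Dict.mk [("total", val + 1), ("correct", cv)] := by
  apply PySem.Dict.ext
  simp [PySem.Dict.modify, PySem.Dict.items_insert, PySem.Dict.getD_eq_get?_getD,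
        PySem.Dict.get?_mk_cons, PySem.Dict.contains_mk]

theorem pv_inner_correct (val cv : Int) :
    (PySem.Dict.mk [("total", val), ("correct", cv)]).modify "correct" 0 (· + 1)
      = PySem.Dict.mk [("total", val), ("correct", cv + 1)] := by
  apply PySem.Dict.ext
  simp [PySem.Dict.modify, PySem.Dict.items_insert, PySem.Dict.getD_eq_get?_getD,
        PySem.Dict.get?_mk_cons, PySem.Dict.contains_mk]

-- A's step is a single insert at bl of the updated inner dict.
theorem pvStepA_eq (d : PySem.Dict String (PySem.Dict String Int)) (v : List (String × String)) :
    pvStepA d v =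
      d.insert ((List.lookup "baseline" v).getD "")
        (if (List.lookup "verdict" v).getD "" == "correct" then
          (((if d.contains ((List.lookup "baseline" v).getD "") then
                d.getD ((List.lookup "baseline" v).getD "") PySem.Dict.empty
              else PySem.Dict.mk [("total", 0), ("correct", 0)]).modify "total" 0 (· + 1)).modify
            "correct" 0 (· + 1))
        else
          ((if d.contains ((List.lookup "baseline" v).getD "") then
              d.getD ((List.lookup "baseline" v).getD "") PySem.Dict.empty
            else PySem.Dict.mk [("total", 0), ("correct", 0)]).modify "total" 0 (· + 1))) := by
  unfold pvStepA
  by_cases hb : d.contains ((List.lookup "baseline" v).getD "")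
  · by_cases hc : ((List.lookup "verdict" v).getD "" == "correct") = true
    all_goals simp [hb, hc, PySem.Dict.modify, PySem.Dict.getD_insert_self,
      PySem.Dict.insert_insert_self]
  · by_cases hc : ((List.lookup "verdict" v).getD "" == "correct") = true
    all_goals simp [hb, hc, PySem.Dict.modify, PySem.Dict.getD_insert_self,
      PySem.Dict.insert_insert_self]

theorem pvStepA_merge (t c : PySem.Dict String Int) (v : List (String × String))
    (hnd : t.keys.Nodup) (hsub : ∀ k, t.contains k = false → c.contains k = false) :
    pvStepA (pvMerge t c) v = pvMerge (pvStepT t v) (pvStepC c v) := by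
  have hmnd : (pvMerge t c).keys.Nodup := (pvMerge_keys t c) ▸ hnd
  rw [pvStepA_eq]
  set bl := (List.lookup "baseline" v).getD "" with hbl
  set cnd := ((List.lookup "verdict" v).getD "" == "correct") with hcnd
  by_cases hb : t.contains bl
  · -- key already present: both sides replace the existing entry at bl
    have hval : (bl, t.getD bl 0) ∈ t.items := by
      have hs : (t.get? bl).isSome := by rw [← PySem.Dict.contains_eq_isSome_get?]; exact hb
      obtain ⟨v0, hv0⟩ := Option.isSome_iff_exists.mp hs
      rw [PySem.Dict.getD_of_get?_eq_some _ _ hv0]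
      exact PySem.Dict.mem_items_of_get?_eq_some _ hv0
    have hmem : (bl, PySem.Dict.mk [("total", t.getD bl 0), ("correct", c.getD bl 0)])
        ∈ (pvMerge t c).items := by
      rw [pvMerge_items]
      exact List.mem_map.mpr ⟨(bl, t.getD bl 0), hval, rfl⟩
    have hgd : (pvMerge t c).getD bl PySem.Dict.empty
        = PySem.Dict.mk [("total", t.getD bl 0), ("correct", c.getD bl 0)] :=
      PySem.Dict.getD_of_mem_items _ hmem hmnd _
    have hck : ∀ p ∈ t.items, p.1 ≠ bl → (pvStepC c v).getD p.1 0 = c.getD p.1 0 := by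
      intro p _ hpk
      unfold pvStepC
      split
      · exact PySem.Dict.getD_insert_of_ne _ _ _ hpk
      · rfl
    have hckbl : (pvStepC c v).getD bl 0 = if cnd then c.getD bl 0 + 1 else c.getD bl 0 := by
      unfold pvStepC
      rw [← hbl, ← hcnd]
      by_cases hc : cnd = true
      · simp only [hc, if_true, PySem.Dict.getD_insert_self]
      · simp_all
    apply PySem.Dict.ext
    rw [PySem.Dict.items_insert_of_contains _ _ ((pvMerge_contains t c bl).trans hb),
      pvMerge_contains, hb, if_pos rfl, hgd, pv_inner_total]
    have ht' : (pvStepT t v).items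
        = t.items.map (fun p => if p.1 == bl then (bl, t.getD bl 0 + 1) else p) := by
      unfold pvStepT
      rw [← hbl]
      exact PySem.Dict.items_insert_of_contains _ _ hb
    rw [pvMerge_items, List.map_map]
    conv_rhs => rw [pvMerge_items, ht', List.map_map]
    apply List.map_congr_left
    intro p hp
    by_cases hpk : p.1 = bl
    · have hp2 : p.2 = t.getD bl 0 := by
        have h := PySem.Dict.getD_of_mem_items (d := t) hp hnd 0
        rw [hpk] at h; omega
      simp only [Function.comp]
      rw [hpk, hp2]
      by_cases hc : cnd = true <;>
        simp [pv_inner_correct, hckbl, hc]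
    · have h1 : (p.1 == bl) = false := by simp [hpk]
      by_cases hc : cnd = true <;>
        simp [Function.comp, h1, hck p hp hpk]
  · -- fresh key: both sides append a new entry at bl
    have hbf : t.contains bl = false := by simpa using hb
    have hcb : c.contains bl = false := hsub bl hbf
    have hne : ∀ p ∈ t.items, p.1 ≠ bl := by
      intro p hp h
      exact absurd ((PySem.Dict.contains_iff_mem_keys t bl).mpr
        (h ▸ PySem.Dict.mem_keys_of_mem_items _ hp)) hb
    have hgd0 : t.getD bl 0 = 0 := PySem.Dict.getD_of_not_contains _ _ hbf
    have hcgd0 : c.getD bl 0 = 0 := PySem.Dict.getD_of_not_contains _ _ hcb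
    have hck : ∀ p ∈ t.items, (pvStepC c v).getD p.1 0 = c.getD p.1 0 := by
      intro p hp
      unfold pvStepC
      split
      · exact PySem.Dict.getD_insert_of_ne _ _ _ (hne p hp)
      · rfl
    have hckbl : (pvStepC c v).getD bl 0 = if cnd then 1 else 0 := by
      unfold pvStepC
      rw [← hbl, ← hcnd]
      by_cases hc : cnd = true
      · simp only [hc, if_true, PySem.Dict.getD_insert_self, hcgd0]
        omega
      · simp_all
    apply PySem.Dict.ext
    rw [PySem.Dict.items_insert_of_not_contains _ _ ((pvMerge_contains t c bl).trans hbf),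
      pvMerge_contains, hbf]
    have ht' : (pvStepT t v).items = t.items ++ [(bl, t.getD bl 0 + 1)] := by
      unfold pvStepT
      rw [← hbl]
      exact PySem.Dict.items_insert_of_not_contains _ _ hbf
    simp only [Bool.false_eq_true, if_false, pv_inner_total, pv_inner_correct]
    rw [pvMerge_items]
    conv_rhs => rw [pvMerge_items, ht']
    rw [List.map_append, List.map_cons, List.map_nil, hckbl, hgd0]
    refine congrArg₂ _ (List.map_congr_left fun p hp => ?_) ?_
    · rw [hck p hp]
    · by_cases hc : cnd = true <;> simp [hc]

theorem pv_fold_merge (l : List (List (String × String))) :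
    ∀ (t c : PySem.Dict String Int), t.keys.Nodup →
      (∀ k, t.contains k = false → c.contains k = false) →
      l.foldl pvStepA (pvMerge t c) = pvMerge (l.foldl pvStepT t) (l.foldl pvStepC c) := by
  induction l with
  | nil => intro t c _ _; rfl
  | cons v l ih =>
      intro t c hnd hsub
      simp only [List.foldl_cons, pvStepA_merge t c v hnd hsub]
      apply ih
      · exact PySem.Dict.nodup_keys_insert _ _ _ hnd
      · intro k hk
        simp only [pvStepT, PySem.Dict.contains_insert, Bool.or_eq_false_iff] at hk
        unfold pvStepC
        split
        · simp only [PySem.Dict.contains_insert, Bool.or_eq_false_iff]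
          exact ⟨hk.1, hsub k hk.2⟩
        · exact hsub k hk.2

-- ===== VERDICT (by name: the statement is the Claim_ definition above) =====
theorem score_from_verdicts_py_spec : Claim_equal_score_from_verdicts_py := by
  intro verdicts _ _
  unfold Spec_score_from_verdicts_py score_from_verdicts_py score_from_verdicts_py_alt
  have h := pv_fold_merge verdicts PySem.Dict.empty PySem.Dict.empty
    (by simp [PySem.Dict.keys_empty]) (by intro k _; simp [PySem.Dict.contains_empty])
  have he : pvMerge PySem.Dict.empty PySem.Dict.empty = PySem.Dict.empty := rfl
  rw [he] at h
  rw [h]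
  simp [pvMerge, List.map_map, Function.comp]
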